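-- pv_equiv track=rewrite | github.com/Akshay-s-raut/Python | Maths tools/diffrentiation/diffrential2.py | chain_rule
-- ===== SOURCE A (Python) =====
-- functions = {'sin()':'cos()','cos()':'-sin()','tan()':'sec^2()',
-- 'sec()':'sec()*tan()','cosec()':'-cosec()*cot()','cot()':'-cosec^2()','ln(arg)':'arg(-1)','e()':'e()','x':'1','x()':''}
--
-- def chain_rule(term):
--     for i in range(0,len(term)):
--         if(term[i]=='('):
--             pos = i
--             break
--     inner = term[pos+1:-1]
--     if("(" in inner):
--         return '{}*{}'.format(functions[term[:pos+1]+')'][:-1]+inner+')',chain_rule(inner))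
--     else:
--         return functions[term[:pos+1]+')'][:-1]+inner+')'
-- ===== SOURCE B (Python) =====
-- functions = {'sin()':'cos()','cos()':'-sin()','tan()':'sec^2()',
-- 'sec()':'sec()*tan()','cosec()':'-cosec()*cot()','cot()':'-cosec^2()','ln(arg)':'arg(-1)','e()':'e()','x':'1','x()':''}
--
-- def chain_rule(term):
--     # precompute all '(' positions once; each layer k is a pure index computation
--     # on the ORIGINAL string: key = term[start:ps[k]+1]+')', inner = term[ps[k]+1:L-1-k]
--     ps = [i for i, c in enumerate(term) if c == '(']
--     L = len(term)
--     factors = []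
--     k = 0
--     while True:
--         start = ps[k - 1] + 1 if k else 0
--         p = ps[k]
--         inner = term[p + 1:L - 1 - k]
--         factors.append(functions[term[start:p + 1] + ')'][:-1] + inner + ')')
--         k += 1
--         if not (k < len(ps) and ps[k] + k < L):
--             return '*'.join(factors)
-- ===== Notes on version B (the rewrite author's own statement) =====
-- stated objective: alternative
-- what changed: Replaced A's recursion over ever-smaller substring windows by one upfront scan collecting all '(' positions, after which each layer's key and inner slice are pure index arithmetic on the original string, accumulated in a factors list joined once.
import Mathlib
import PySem

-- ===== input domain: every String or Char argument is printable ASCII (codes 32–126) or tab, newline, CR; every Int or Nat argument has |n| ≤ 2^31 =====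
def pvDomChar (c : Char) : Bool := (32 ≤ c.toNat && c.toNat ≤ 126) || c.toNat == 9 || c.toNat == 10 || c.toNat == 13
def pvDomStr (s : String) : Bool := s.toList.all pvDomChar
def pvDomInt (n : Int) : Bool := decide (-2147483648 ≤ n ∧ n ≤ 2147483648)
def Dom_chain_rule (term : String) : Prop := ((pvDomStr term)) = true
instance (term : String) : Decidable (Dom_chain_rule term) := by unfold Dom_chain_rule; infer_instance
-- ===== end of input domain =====

-- B replaces A's recursion over ever-smaller substring windows by one upfront scan for all
-- '(' positions, each layer then being pure index arithmetic on the ORIGINAL string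
-- ('alternative'; same cost).

-- the module-level dict 'functions' (shared context of both programs)
def pyFunctions : PySem.Dict String String :=
  PySem.Dict.ofList [("sin()", "cos()"), ("cos()", "-sin()"), ("tan()", "sec^2()"),
    ("sec()", "sec()*tan()"), ("cosec()", "-cosec()*cot()"), ("cot()", "-cosec^2()"),
    ("ln(arg)", "arg(-1)"), ("e()", "e()"), ("x", "1"), ("x()", "")]

-- ===== PORT A =====
-- A's scan 'for i in range(0,len(term)): if term[i]=='(': pos=i; break' : first index of '('
def findParen : List Char → Nat → Option Nat
  | [], _ => none
  | c :: rest, i => if c = '(' then some i else findParen rest (i + 1)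

-- slices ported by hand, exact: term[pos+1:-1] = (take (len-1)).drop (pos+1) for 0 ≤ pos;
-- v[:-1] = dropLast; '"(" in inner' for a 1-char needle = list membership.
def chainA : List Char → List Char
  | [] => []          -- Python: 'pos' unbound → UnboundLocalError; excluded by Pre_
  | c :: rest =>
    match findParen (c :: rest) 0 with
    | none => []      -- Python: 'pos' unbound → UnboundLocalError; excluded by Pre_
    | some pos =>
      match pyFunctions.get? (String.ofList ((c :: rest).take (pos + 1) ++ [')'])) with
      | none => []    -- Python: KeyError; excluded by Pre_
      | some v =>
        if '(' ∈ (((c :: rest).take ((c :: rest).length - 1)).drop (pos + 1)) then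
          (v.toList.dropLast ++ (((c :: rest).take ((c :: rest).length - 1)).drop (pos + 1)) ++ [')'])
            ++ '*' :: chainA (((c :: rest).take ((c :: rest).length - 1)).drop (pos + 1))
        else
          v.toList.dropLast ++ (((c :: rest).take ((c :: rest).length - 1)).drop (pos + 1)) ++ [')']
termination_by cs => cs.length
decreasing_by simp <;> omega

def chain_rule (term : String) : String := String.ofList (chainA term.toList)

-- ===== PORT B =====
-- B's upfront scan: 'ps = [i for i, c in enumerate(term) if c == '(']'
def parenIdxs (cs : List Char) : List Nat := List.findIdxs (fun c => c = '(') cs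

-- B's while-loop over the precomputed positions: layer k reads term[start:ps[k]+1]+')'
-- and inner = term[ps[k]+1:L-1-k] (both slices nonneg here), stops when the next
-- position fails ps[k+1]+(k+1) < L
def peelB (cs : List Char) (L : Nat) : Nat → Nat → List Nat → List (List Char)
  | _, _, [] => []   -- Python: ps[0] raises IndexError; excluded by Pre_
  | start, k, p :: rest =>
    match pyFunctions.get? (String.ofList ((cs.take (p + 1)).drop start ++ [')'])) with
    | none => []     -- Python: KeyError; excluded by Pre_
    | some v =>
      match rest with
      | [] => [v.toList.dropLast ++ ((cs.take (L - 1 - k)).drop (p + 1)) ++ [')']]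
      | p' :: _ =>
        if p' + (k + 1) < L then
          (v.toList.dropLast ++ ((cs.take (L - 1 - k)).drop (p + 1)) ++ [')'])
            :: peelB cs L (p + 1) (k + 1) rest
        else
          [v.toList.dropLast ++ ((cs.take (L - 1 - k)).drop (p + 1)) ++ [')']]

-- '*'.join(factors)
def chain_rule_alt (term : String) : String :=
  String.ofList (PySem.Chars.join ['*']
    (peelB term.toList term.toList.length 0 0 (parenIdxs term.toList)))

-- ===== PRECONDITION & SPEC =====
-- the k-th peeled layer exists iff the k-th '(' lies before the k-times-shortened right end:
-- the opening parentheses q with q + (its rank) < |cs|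
def layerPs (cs : List Char) : List Nat :=
  (((parenIdxs cs).zipIdx).takeWhile (fun qk => qk.1 + qk.2 < cs.length)).map Prod.fst

-- the segment from s through position q, with ')' appended, is a key of 'functions'
def keyAt (cs : List Char) (s q : Nat) : Bool :=
  (pyFunctions.get? (String.ofList ((cs.take (q + 1)).drop s ++ [')']))).isSome

-- Pre_ excludes exactly the inputs on which A raises: there must be at least one '(' layer
-- (else 'pos' is unbound → UnboundLocalError), and for every layer the text from the previous
-- '(' (exclusive) through the current '(' must, with ')' appended, be a key of 'functions'
-- (else KeyError); A returns on every input of Pre_.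
def Pre_chain_rule (term : String) : Prop :=
  layerPs term.toList ≠ [] ∧
    ∀ pq ∈ (0 :: (layerPs term.toList).map (· + 1)).zip (layerPs term.toList),
      keyAt term.toList pq.1 pq.2 = true
instance (term : String) : Decidable (Pre_chain_rule term) := by unfold Pre_chain_rule; infer_instance

def pvWitness_chain_rule : String := "sin(cos(x))"

def Spec_chain_rule (term : String) (out : String) : Prop := out = chain_rule_alt term
instance (term : String) (out : String) : Decidable (Spec_chain_rule term out) := by unfold Spec_chain_rule; infer_instance

-- ===== CLAIM (what is proved, stated in full; the proofs are below) =====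
def Claim_equal_chain_rule : Prop := ∀ (term : String), Dom_chain_rule term → Pre_chain_rule term → Spec_chain_rule term (chain_rule term)

-- ===== LEMMAS AND PROOFS =====

-- proof-side bridge 1: A's recursion with the per-layer factors made explicit (the
-- window-by-window iteration), as an accumulator loop
def loopB : List Char → List (List Char) → List (List Char)
  | [], factors => factors
  | c :: rest, factors =>
    match PySem.List.index? (c :: rest) '(' with
    | none => factors
    | some pos =>
      match pyFunctions.get? (String.ofList ((c :: rest).take (pos + 1) ++ [')'])) with
      | none => factors
      | some v =>
        if '(' ∈ (((c :: rest).take ((c :: rest).length - 1)).drop (pos + 1)) then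
          loopB (((c :: rest).take ((c :: rest).length - 1)).drop (pos + 1))
            (factors ++ [v.toList.dropLast ++ (((c :: rest).take ((c :: rest).length - 1)).drop (pos + 1)) ++ [')']])
        else
          factors ++ [v.toList.dropLast ++ (((c :: rest).take ((c :: rest).length - 1)).drop (pos + 1)) ++ [')']]
termination_by cs _ => cs.length
decreasing_by simp <;> omega

-- proof-side bridge 2: the layer-by-layer well-formedness check, recursively
def preChain : List Char → Bool
  | [] => false
  | c :: rest =>
    match PySem.List.index? (c :: rest) '(' with
    | none => false
    | some pos =>
      (pyFunctions.get? (String.ofList ((c :: rest).take (pos + 1) ++ [')']))).isSome &&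
        (if '(' ∈ (((c :: rest).take ((c :: rest).length - 1)).drop (pos + 1)) then
          preChain (((c :: rest).take ((c :: rest).length - 1)).drop (pos + 1))
        else true)
termination_by cs => cs.length
decreasing_by simp <;> omega

-- facts about List.findIdxs
lemma findIdxs_offset (p : Char → Bool) (cs : List Char) (s : Nat) :
    List.findIdxs p cs s = (List.findIdxs p cs 0).map (· + s) := by
  induction cs generalizing s with
  | nil => simp [List.findIdxs]
  | cons c t ih =>
    rw [List.findIdxs_cons, List.findIdxs_cons]
    by_cases h : p c
    · rw [if_pos h, if_pos h, ih (s + 1), ih 1, List.map_cons, List.map_map]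
      refine congrArg₂ _ (by omega) (List.map_congr_left fun x _ => by simp; omega)
    · rw [if_neg h, if_neg h, ih (s + 1), ih 1, List.map_map]
      exact List.map_congr_left fun x _ => by simp; omega

lemma index?_eq_head_findIdxs (cs : List Char) :
    PySem.List.index? cs '(' = (List.findIdxs (fun c => c = '(') cs 0).head? := by
  induction cs with
  | nil => simp [PySem.List.index?_eq_idxOf?, List.findIdxs]
  | cons c t ih =>
    by_cases h : c = '('
    · subst h
      rw [PySem.List.index?_cons_self, List.findIdxs_cons]
      simp
    · rw [PySem.List.index?_cons_of_ne t h, List.findIdxs_cons]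
      rw [PySem.List.index?_eq_idxOf?] at ih
      simp [h, findIdxs_offset _ t 1, List.head?_map, ih]

lemma findIdxs_take (p : Char → Bool) : ∀ (b : Nat) (cs : List Char),
    List.findIdxs p (cs.take b) 0 = (List.findIdxs p cs 0).filter (fun q => q < b) := by
  intro b
  induction b generalizing p with
  | zero => intro cs; simp [List.findIdxs]
  | succ b ih =>
    intro cs
    match cs with
    | [] => simp [List.findIdxs]
    | c :: t =>
      rw [List.take_succ_cons, List.findIdxs_cons, List.findIdxs_cons]
      by_cases h : p c
      · rw [if_pos h, if_pos h, findIdxs_offset _ _ 1, findIdxs_offset p t 1,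
          List.filter_cons, if_pos (by simp), ih p t, List.filter_map]
        exact congrArg _ (congrArg _ (List.filter_congr fun x _ => by simp))
      · rw [if_neg h, if_neg h, findIdxs_offset _ _ 1, findIdxs_offset p t 1,
          ih p t, List.filter_map]
        exact congrArg _ (List.filter_congr fun x _ => by simp)

lemma findIdxs_drop (p : Char → Bool) : ∀ (a : Nat) (cs : List Char),
    List.findIdxs p (cs.drop a) 0 =
      ((List.findIdxs p cs 0).filter (fun q => a ≤ q)).map (· - a) := by
  intro a
  induction a generalizing p with
  | zero =>
    intro cs
    rw [List.drop_zero, List.filter_eq_self.mpr (fun x _ => by simp)]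
    simp
  | succ a ih =>
    intro cs
    match cs with
    | [] => simp [List.findIdxs]
    | c :: t =>
      rw [List.drop_succ_cons, List.findIdxs_cons, ih p t]
      by_cases h : p c
      · rw [if_pos h, List.filter_cons, if_neg (by simp), findIdxs_offset p t 1,
          List.filter_map]
        rw [List.filter_congr (fun x _ => by simp :
          ∀ x ∈ List.findIdxs p t 0, ((fun q => decide (a + 1 ≤ q)) ∘ (fun x => x + 1)) x
            = decide (a ≤ x))]
        rw [List.map_map]
        exact List.map_congr_left fun x _ => by simp only [Function.comp_apply]; omega
      · rw [if_neg h, findIdxs_offset p t 1, List.filter_map]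
        rw [List.filter_congr (fun x _ => by simp :
          ∀ x ∈ List.findIdxs p t 0, ((fun q => decide (a + 1 ≤ q)) ∘ (fun x => x + 1)) x
            = decide (a ≤ x))]
        rw [List.map_map]
        exact List.map_congr_left fun x _ => by simp only [Function.comp_apply]; omega

lemma findIdxs_lt (p : Char → Bool) : ∀ (cs : List Char), ∀ q ∈ List.findIdxs p cs 0, q < cs.length := by
  intro cs
  induction cs with
  | nil => simp [List.findIdxs]
  | cons c t ih =>
    intro q hq
    rw [List.findIdxs_cons, findIdxs_offset p t 1] at hq
    by_cases h : p c
    · rw [if_pos h] at hq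
      rcases hq with _ | hq
      · simp
      · obtain ⟨x, hx, rfl⟩ := List.mem_map.mp (by assumption)
        have := ih x hx; simp; omega
    · rw [if_neg h] at hq
      obtain ⟨x, hx, rfl⟩ := List.mem_map.mp hq
      have := ih x hx; simp; omega

lemma findIdxs_pairwise (p : Char → Bool) : ∀ (cs : List Char),
    (List.findIdxs p cs 0).Pairwise (· < ·) := by
  intro cs
  induction cs with
  | nil => simp [List.findIdxs]
  | cons c t ih =>
    rw [List.findIdxs_cons, findIdxs_offset p t 1]
    have hmap : ((List.findIdxs p t 0).map (· + 1)).Pairwise (· < ·) :=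
      List.Pairwise.map _ (fun a b h => by omega) ih
    by_cases h : p c
    · rw [if_pos h]
      refine List.pairwise_cons.mpr ⟨?_, hmap⟩
      intro q hq
      obtain ⟨x, _, rfl⟩ := List.mem_map.mp hq
      omega
    · rw [if_neg h]; exact hmap

lemma paren_mem_iff (cs : List Char) :
    '(' ∈ cs ↔ List.findIdxs (fun c => c = '(') cs 0 ≠ [] := by
  induction cs with
  | nil => simp [List.findIdxs]
  | cons c t ih =>
    rw [List.findIdxs_cons, findIdxs_offset _ t 1]
    by_cases h : c = '('
    · subst h; simp
    · simp [h, ih, Ne.symm h]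

-- the per-layer key test translates along the window shift
lemma keyAt_shift (cs : List Char) (a s q : Nat) (h : a + q + 1 ≤ cs.length - 1) :
    keyAt ((cs.take (cs.length - 1)).drop a) s q = keyAt cs (s + a) (a + q) := by
  unfold keyAt
  have h1 : (((cs.take (cs.length - 1)).drop a).take (q + 1)).drop s
      = (cs.take (a + q + 1)).drop (s + a) := by
    rw [List.take_drop, List.take_take, List.drop_drop]
    rw [show min (a + (q + 1)) (cs.length - 1) = a + q + 1 by omega,
      show a + s = s + a by omega]
  rw [h1]

-- the layer sequence of the peeled-once input is the shifted tail of the layer sequence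
lemma takeWhile_zipIdx_shift : ∀ (T : List Nat) (a L j : Nat), T.Pairwise (· < ·) →
    (∀ t ∈ T, a ≤ t) →
    ((((T.filter (fun q => q < L - 1)).map (· - a)).zipIdx j).takeWhile
        (fun qk => qk.1 + qk.2 < L - 1 - a)).map Prod.fst
      = (((T.zipIdx (j + 1)).takeWhile (fun qk => qk.1 + qk.2 < L)).map Prod.fst).map (· - a) := by
  intro T
  induction T with
  | nil => intro a L j _ _; simp
  | cons t T' ih =>
    intro a L j hpw hge
    have hat : a ≤ t := hge t (List.mem_cons_self)
    rw [List.zipIdx_cons, List.takeWhile_cons, List.filter_cons]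
    by_cases hcut : t < L - 1
    · rw [if_pos (by simpa using hcut), List.map_cons, List.zipIdx_cons, List.takeWhile_cons]
      by_cases hcond : t + (j + 1) < L
      · rw [if_pos (by simp; omega), if_pos (by simpa using hcond), List.map_cons,
          List.map_cons, List.map_cons]
        refine congrArg₂ _ rfl ?_
        exact ih a L (j + 1) (List.pairwise_cons.mp hpw).2 (fun x hx => le_of_lt
          (lt_of_le_of_lt hat ((List.pairwise_cons.mp hpw).1 x hx)))
      · rw [if_neg (by simp; omega), if_neg (by simpa using hcond)]
        simp
    · rw [if_neg (by simpa using hcut)]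
      have hnil : T'.filter (fun q => q < L - 1) = [] := by
        rw [List.filter_eq_nil_iff]
        intro x hx
        have := (List.pairwise_cons.mp hpw).1 x hx
        simp; omega
      rw [hnil, if_neg (by simp; omega)]
      simp

-- PreBody implies the recursive check, layer by layer
lemma pre_sound : ∀ (n : Nat) (cs : List Char), cs.length ≤ n → layerPs cs ≠ [] →
    (∀ pq ∈ (0 :: (layerPs cs).map (· + 1)).zip (layerPs cs), keyAt cs pq.1 pq.2 = true) →
    preChain cs = true := by
  intro n
  induction n with
  | zero =>
    intro cs hn h1 _
    have : cs = [] := List.length_eq_zero_iff.mp (Nat.le_zero.mp hn)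
    subst this
    exact absurd (by simp [layerPs, parenIdxs, List.findIdxs]) h1
  | succ n ih =>
    intro cs hn h1 h2
    match cs with
    | [] => exact absurd (by simp [layerPs, parenIdxs, List.findIdxs]) h1
    | c :: rest =>
      rcases hF : parenIdxs (c :: rest) with _ | ⟨q₀, F'⟩
      · exact absurd (by simp [layerPs, hF]) h1
      · have hq0mem : q₀ ∈ parenIdxs (c :: rest) := by rw [hF]; exact List.mem_cons_self
        have hq0L : q₀ < (c :: rest).length := findIdxs_lt _ _ q₀ hq0mem
        have hq0L' : q₀ < rest.length + 1 := by simpa using hq0L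
        have hLc : (c :: rest).length = rest.length + 1 := by simp
        have hFpw : (q₀ :: F').Pairwise (· < ·) := hF ▸ findIdxs_pairwise _ (c :: rest)
        have hF'gt : ∀ t ∈ F', q₀ < t := (List.pairwise_cons.mp hFpw).1
        set a := q₀ + 1 with ha
        set T : List Nat := ((F'.zipIdx 1).takeWhile
          (fun qk => qk.1 + qk.2 < (c :: rest).length)).map Prod.fst with hT
        clear_value T
        have hlayer : layerPs (c :: rest) = q₀ :: T := by
          rw [layerPs, hF, List.zipIdx_cons, List.takeWhile_cons,
            if_pos (by simp; omega), List.map_cons, hT]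
        have hF0 : List.findIdxs (fun c => (c = '(' : Bool)) (c :: rest) 0 = q₀ :: F' := hF
        have hTmem : ∀ t ∈ T, t ∈ F' ∧ t < (c :: rest).length - 1 := by
          intro t ht
          rw [hT] at ht
          obtain ⟨qk, hqk, rfl⟩ := List.mem_map.mp ht
          have hcond := List.mem_takeWhile_imp hqk
          have hmemz : qk ∈ F'.zipIdx 1 := (List.takeWhile_prefix _).subset hqk
          obtain ⟨hk1, _, hx⟩ := List.mem_zipIdx (x := qk.1) (i := qk.2) (by simpa using hmemz)
          refine ⟨hx ▸ (F'.getElem_mem _), by simp at hcond ⊢; omega⟩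
        -- the first key
        have hkey0 : keyAt (c :: rest) 0 q₀ = true :=
          h2 (0, q₀) (by rw [hlayer, List.map_cons, List.zip_cons_cons]; exact List.mem_cons_self)
        obtain ⟨v, hv⟩ := Option.isSome_iff_exists.mp hkey0
        -- unfold the recursive check one step
        rw [preChain.eq_2, index?_eq_head_findIdxs, hF0]
        simp only [List.head?_cons]
        simp only [List.drop_zero] at hv
        rw [hv]
        simp only [Option.isSome_some, Bool.true_and]
        set inner := (((c :: rest).take ((c :: rest).length - 1)).drop a) with hinner
        by_cases hmem : '(' ∈ inner
        · rw [if_pos hmem]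
          -- the '(' positions of inner
          have hFin : parenIdxs inner = (F'.filter (fun q => q < (c :: rest).length - 1)).map (· - a) := by
            unfold parenIdxs
            rw [hinner, findIdxs_drop, findIdxs_take, hF0,
              List.filter_filter, List.filter_cons, if_neg (by simp; omega)]
            exact congrArg _ (List.filter_congr fun x hx => by
              have := hF'gt x hx; simp; omega)
          -- its layer sequence is the shifted tail
          have hLin : inner.length = (c :: rest).length - 1 - a := by
            rw [hinner]; simp
          have hlayerIn : layerPs inner = T.map (· - a) := by
            rw [layerPs, hFin, hLin, hT]
            have := takeWhile_zipIdx_shift F' a ((c :: rest).length) 0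
              (List.pairwise_cons.mp hFpw).2 (fun t ht => by have := hF'gt t ht; omega)
            rw [this, List.map_map]
          -- inner has a first layer
          have hTne : T ≠ [] := by
            have hne : parenIdxs inner ≠ [] := (paren_mem_iff inner).mp hmem
            rw [hFin] at hne
            have : F'.filter (fun q => q < (c :: rest).length - 1) ≠ [] := by
              intro hc; rw [hc] at hne; exact hne rfl
            obtain ⟨t, htF, htlt⟩ : ∃ t ∈ F', t < (c :: rest).length - 1 := by
              rcases List.exists_mem_of_ne_nil _ this with ⟨t, ht⟩
              have := List.mem_filter.mp ht
              exact ⟨t, this.1, by simpa using this.2⟩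
            obtain ⟨t₁, F'', hF'⟩ : ∃ t₁ F'', F' = t₁ :: F'' := by
              cases F' with
              | nil => exact absurd htF (List.not_mem_nil)
              | cons x xs => exact ⟨x, xs, rfl⟩
            have htF' : t ∈ t₁ :: F'' := hF' ▸ htF
            have ht₁ : t₁ < (c :: rest).length - 1 := by
              rcases List.mem_cons.mp htF' with heq | hmem'
              · exact heq ▸ htlt
              · have hpwF'' : ∀ x ∈ F'', t₁ < x :=
                  (List.pairwise_cons.mp (hF' ▸ (List.pairwise_cons.mp hFpw).2)).1
                have := hpwF'' t hmem'
                omega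
            rw [hT, hF', List.zipIdx_cons, List.takeWhile_cons, if_pos (by simp; omega),
              List.map_cons]
            exact List.cons_ne_nil _ _
          have hlayerInNe : layerPs inner ≠ [] := by
            rw [hlayerIn]
            intro hc
            exact hTne (List.map_eq_nil_iff.mp hc)
          -- the keys of inner, transferred from the top level
          have haleT : ∀ t ∈ T, a ≤ t := fun t ht => by
            have := hF'gt t (hTmem t ht).1; omega
          have hmapswap : (T.map (· - a)).map (· + 1) = (T.map (· + 1)).map (· - a) := by
            rw [List.map_map, List.map_map]
            exact List.map_congr_left fun t ht => by
              have := haleT t ht; simp only [Function.comp_apply]; omega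
          have hzipIn : (0 :: (layerPs inner).map (· + 1)).zip (layerPs inner)
              = ((a :: T.map (· + 1)).zip T).map (Prod.map (· - a) (· - a)) := by
            rw [hlayerIn, hmapswap]
            calc (0 :: (T.map (· + 1)).map (· - a)).zip (T.map (· - a))
                = ((a :: T.map (· + 1)).map (· - a)).zip (T.map (· - a)) := by
                  rw [List.map_cons, Nat.sub_self]
              _ = ((a :: T.map (· + 1)).zip T).map (Prod.map (· - a) (· - a)) := List.zip_map
          have hkeysIn : ∀ pq ∈ (0 :: (layerPs inner).map (· + 1)).zip (layerPs inner),
              keyAt inner pq.1 pq.2 = true := by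
            intro pq hpq
            rw [hzipIn] at hpq
            obtain ⟨rs, hrs, rfl⟩ := List.mem_map.mp hpq
            have hrs1 : a ≤ rs.1 := by
              have hmc := (List.of_mem_zip (by rw [← Prod.mk.eta (p := rs)] at hrs; exact hrs)).1
              rcases List.mem_cons.mp hmc with heq | hmem'
              · omega
              · obtain ⟨x, hx, hxe⟩ := List.mem_map.mp hmem'
                have := haleT x hx; omega
            have hrs2 : rs.2 ∈ T := (List.of_mem_zip (by rw [← Prod.mk.eta (p := rs)] at hrs; exact hrs)).2
            have hrs2a : a ≤ rs.2 := haleT _ hrs2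
            have hrs2lt : rs.2 < (c :: rest).length - 1 := (hTmem _ hrs2).2
            -- top-level key for this pair
            have htop : keyAt (c :: rest) rs.1 rs.2 = true := by
              refine h2 rs ?_
              rw [hlayer, List.map_cons, List.zip_cons_cons]
              refine List.mem_cons_of_mem _ ?_
              have : (q₀ + 1) :: (T.map (· + 1)) = a :: T.map (· + 1) := by rw [ha]
              rw [this]
              rw [← Prod.mk.eta (p := rs)] at hrs
              exact hrs
            have hshift := keyAt_shift (c :: rest) a (rs.1 - a) (rs.2 - a) (by omega)
            rw [← hinner] at hshift
            have e1 : rs.1 - a + a = rs.1 := by omega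
            have e2 : a + (rs.2 - a) = rs.2 := by omega
            rw [e1, e2] at hshift
            simp only [Prod.map]
            rw [hshift]
            exact htop
          have hlenIn : inner.length ≤ n := by
            rw [hLin]; simp at hn ⊢; omega
          exact ih inner hlenIn hlayerInNe hkeysIn
        · rw [if_neg hmem]

-- A's scan equals Python's .index used by the bridge loop
lemma findParen_eq (cs : List Char) (i : Nat) :
    findParen cs i = (PySem.List.index? cs '(').map (· + i) := by
  induction cs generalizing i with
  | nil => simp [findParen, PySem.List.index?_eq_idxOf?]
  | cons c rest ih =>
    by_cases h : c = '('
    · subst h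
      rw [PySem.List.index?_cons_self]
      simp [findParen]
    · rw [PySem.List.index?_cons_of_ne rest h]
      rw [findParen, if_neg h, ih (i + 1), Option.map_map]
      rcases PySem.List.index? rest '(' with _ | k <;> simp <;> omega

-- accumulator form of the bridge loop
lemma loopB_acc : ∀ (n : Nat) (cs : List Char), cs.length ≤ n →
    ∀ facs, loopB cs facs = facs ++ loopB cs [] := by
  intro n
  induction n with
  | zero =>
    intro cs hn facs
    have hnil : cs = [] := List.length_eq_zero_iff.mp (Nat.le_zero.mp hn)
    subst hnil
    rw [loopB.eq_1, loopB.eq_1]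
    simp
  | succ n ih =>
    intro cs hn facs
    match cs with
    | [] => rw [loopB.eq_1, loopB.eq_1]; simp
    | c :: rest =>
      rw [loopB.eq_2, loopB.eq_2]
      rcases hp : PySem.List.index? (c :: rest) '(' with _ | pos
      · simp only [hp]; simp
      · simp only [hp]
        rcases hv : pyFunctions.get? (String.ofList ((c :: rest).take (pos + 1) ++ [')'])) with _ | v
        · simp only [hv]; simp
        · simp only [hv]
          set G := ((c :: rest).take ((c :: rest).length - 1)).drop (pos + 1) with hG
          have hlen : G.length ≤ n := by
            rw [hG]; simp at hn ⊢; omega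
          by_cases hmem : '(' ∈ G
          · rw [if_pos hmem, if_pos hmem]
            conv_lhs => rw [ih G hlen]
            conv_rhs => rw [ih G hlen]
            simp
          · rw [if_neg hmem, if_neg hmem]
            simp

lemma loopB_ne_nil (cs : List Char) (h : preChain cs = true) : loopB cs [] ≠ [] := by
  match cs with
  | [] => rw [preChain.eq_1] at h; simp at h
  | c :: rest =>
    rw [preChain.eq_2] at h
    rw [loopB.eq_2]
    rcases hp : PySem.List.index? (c :: rest) '(' with _ | pos
    · simp only [hp] at h; simp at h
    · simp only [hp] at h ⊢
      rcases hv : pyFunctions.get? (String.ofList ((c :: rest).take (pos + 1) ++ [')'])) with _ | v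
      · simp only [hv] at h; simp at h
      · simp only [hv]
        set G := ((c :: rest).take ((c :: rest).length - 1)).drop (pos + 1) with hG
        by_cases hmem : '(' ∈ G
        · rw [if_pos hmem]
          rw [loopB_acc G.length G (le_refl _)]
          simp
        · rw [if_neg hmem]
          simp

-- main agreement, part 1: A's recursion computes the join of the bridge loop's factor list
lemma main_eq : ∀ (n : Nat) (cs : List Char), cs.length ≤ n → preChain cs = true →
    chainA cs = PySem.Chars.join ['*'] (loopB cs []) := by
  intro n
  induction n with
  | zero =>
    intro cs hn h
    have hnil : cs = [] := List.length_eq_zero_iff.mp (Nat.le_zero.mp hn)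
    subst hnil
    rw [preChain.eq_1] at h; simp at h
  | succ n ih =>
    intro cs hn h
    match cs with
    | [] => rw [preChain.eq_1] at h; simp at h
    | c :: rest =>
      rw [preChain.eq_2] at h
      rw [chainA.eq_2, loopB.eq_2]
      have hf := findParen_eq (c :: rest) 0
      rcases hp : PySem.List.index? (c :: rest) '(' with _ | pos
      · simp only [hp] at h; simp at h
      · simp only [hp] at h
        simp only [hp, Option.map_some, Nat.add_zero] at hf
        simp only [hf, hp]
        rcases hv : pyFunctions.get? (String.ofList ((c :: rest).take (pos + 1) ++ [')'])) with _ | v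
        · simp only [hv] at h; simp at h
        · simp only [hv] at h ⊢
          simp only [Option.isSome_some, Bool.true_and] at h
          set G := ((c :: rest).take ((c :: rest).length - 1)).drop (pos + 1) with hG
          have hlen : G.length ≤ n := by
            rw [hG]; simp at hn ⊢; omega
          by_cases hmem : '(' ∈ G
          · rw [if_pos hmem] at h
            rw [if_pos hmem, if_pos hmem]
            rw [ih G hlen h,
              loopB_acc G.length G (le_refl _) ([] ++ [v.toList.dropLast ++ G ++ [')']])]
            rcases hne : loopB G [] with _ | ⟨g, tl⟩
            · exact absurd hne (loopB_ne_nil G h)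
            · rw [List.nil_append, List.singleton_append, PySem.Chars.join_cons_cons]
              simp
          · rw [if_neg hmem, if_neg hmem]
            simp [PySem.Chars.join_singleton]

-- main agreement, part 2: the bridge loop over shrinking windows equals B's index
-- arithmetic over the precomputed '(' positions of the original string
lemma loopB_eq_peelB (cs : List Char) : ∀ (ps : List Nat) (s k : Nat),
    ps = (parenIdxs cs).filter (fun q => s ≤ q) →
    (∀ p ∈ ps.head?, p + k < cs.length) →
    loopB ((cs.take (cs.length - k)).drop s) [] = peelB cs cs.length s k ps := by
  intro ps
  induction ps with
  | nil =>
    intro s k hps _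
    have hnone : ∀ q ∈ parenIdxs cs, ¬ s ≤ q := by
      intro q hq hsq
      have : q ∈ (parenIdxs cs).filter (fun q => s ≤ q) := List.mem_filter.mpr ⟨hq, by simpa⟩
      rw [← hps] at this
      exact List.not_mem_nil this
    have hPW : List.findIdxs (fun c => c = '(') ((cs.take (cs.length - k)).drop s) 0 = [] := by
      rw [findIdxs_drop, findIdxs_take]
      rw [show ((List.findIdxs (fun c => c = '(') cs 0).filter
          (fun q => q < cs.length - k)).filter (fun q => s ≤ q) = [] from
        List.filter_eq_nil_iff.mpr (fun q hq => by
          have := hnone q (List.mem_filter.mp hq).1; simpa)]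
      simp
    rcases hW : (cs.take (cs.length - k)).drop s with _ | ⟨c, r⟩
    · rw [loopB.eq_1, peelB]
    · rw [hW] at hPW
      rw [loopB.eq_2, index?_eq_head_findIdxs, hPW, peelB]
      rfl
  | cons p rest ih =>
    intro s k hps hhead
    have hpk : p + k < cs.length := hhead p (by simp)
    have hpmem : p ∈ (parenIdxs cs).filter (fun q => s ≤ q) := hps ▸ List.mem_cons_self
    have hpP : p ∈ parenIdxs cs := (List.mem_filter.mp hpmem).1
    have hsp : s ≤ p := by have := (List.mem_filter.mp hpmem).2; simpa using this
    have hpL : p < cs.length := findIdxs_lt _ cs p hpP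
    have hPpw : (parenIdxs cs).Pairwise (· < ·) := findIdxs_pairwise _ cs
    have hfilpw : (p :: rest).Pairwise (· < ·) := by
      rw [hps]; exact List.Pairwise.sublist List.filter_sublist hPpw
    have hrestgt : ∀ x ∈ rest, p < x := (List.pairwise_cons.mp hfilpw).1
    have hrest : rest = (parenIdxs cs).filter (fun q => p + 1 ≤ q) := by
      have h1 : (parenIdxs cs).filter (fun q => p + 1 ≤ q)
          = ((parenIdxs cs).filter (fun q => s ≤ q)).filter (fun q => p + 1 ≤ q) := by
        rw [List.filter_filter]
        exact (List.filter_congr fun q _ => by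
          by_cases h : p + 1 ≤ q
          · have hs : s ≤ q := by omega
            simp [h, hs]
          · simp [h]).symm
      rw [h1, ← hps, List.filter_cons, if_neg (by simp), List.filter_eq_self.mpr
        (fun x hx => by have := hrestgt x hx; simpa using this)]
    -- the '(' positions of the current window
    have hPW : List.findIdxs (fun c => c = '(') ((cs.take (cs.length - k)).drop s) 0
        = ((p :: rest).filter (fun q => q < cs.length - k)).map (· - s) := by
      rw [findIdxs_drop, findIdxs_take, hps, List.filter_filter, List.filter_filter]
      exact congrArg _ (List.filter_congr fun q _ => by
        by_cases h1 : q < cs.length - k <;> by_cases h2 : s ≤ q <;> simp [h1, h2])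
    have hfilhead : (p :: rest).filter (fun q => q < cs.length - k)
        = p :: rest.filter (fun q => q < cs.length - k) := by
      rw [List.filter_cons, if_pos (by simpa using (by omega : p < cs.length - k))]
    have hidx : PySem.List.index? ((cs.take (cs.length - k)).drop s) '(' = some (p - s) := by
      rw [index?_eq_head_findIdxs, hPW, hfilhead]
      simp
    have hWlen : ((cs.take (cs.length - k)).drop s).length = cs.length - k - s := by
      rw [List.length_drop, List.length_take]; omega
    rcases hW : (cs.take (cs.length - k)).drop s with _ | ⟨c, r⟩
    · rw [hW] at hWlen; simp at hWlen; omega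
    · rw [hW] at hidx hWlen
      rw [loopB.eq_2, hidx]
      dsimp only
      -- the key slice on the window equals B's key slice on the original string
      have hkey : (c :: r).take (p - s + 1) = (cs.take (p + 1)).drop s := by
        rw [← hW, List.take_drop, List.take_take,
          show min (s + (p - s + 1)) (cs.length - k) = p + 1 by omega]
      rw [hkey, peelB]
      rcases hv : pyFunctions.get? (String.ofList ((cs.take (p + 1)).drop s ++ [')'])) with _ | v
      · rfl
      · -- the inner slice on the window equals B's inner slice on the original string
        have hinner : ((c :: r).take ((c :: r).length - 1)).drop (p - s + 1)
            = (cs.take (cs.length - 1 - k)).drop (p + 1) := by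
          rw [hWlen, ← hW, List.take_drop, List.take_take,
            show min (s + (cs.length - k - s - 1)) (cs.length - k) = cs.length - 1 - k by omega,
            List.drop_drop,
            show s + (p - s + 1) = p + 1 by omega]
        rw [hinner]
        dsimp only
        have hPin : List.findIdxs (fun c => c = '(') ((cs.take (cs.length - 1 - k)).drop (p + 1)) 0
            = (rest.filter (fun q => q < cs.length - 1 - k)).map (· - (p + 1)) := by
          rw [findIdxs_drop, findIdxs_take, hrest, List.filter_filter, List.filter_filter]
          exact congrArg _ (List.filter_congr fun q _ => by
            by_cases h1 : q < cs.length - 1 - k <;> by_cases h2 : p + 1 ≤ q <;> simp [h1, h2])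
        rcases rest with _ | ⟨p', rest'⟩
        · have hnp : '(' ∉ (cs.take (cs.length - 1 - k)).drop (p + 1) := by
            rw [paren_mem_iff, hPin]
            simp
          rw [if_neg hnp]
          simp
        · dsimp only
          by_cases hcond : p' + (k + 1) < cs.length
          · have hmem : '(' ∈ (cs.take (cs.length - 1 - k)).drop (p + 1) := by
              rw [paren_mem_iff, hPin, List.filter_cons, if_pos (by simp; omega)]
              simp
            rw [if_pos hmem, if_pos hcond,
              loopB_acc ((cs.take (cs.length - 1 - k)).drop (p + 1)).length _ (le_refl _)]
            have := ih (p + 1) (k + 1) hrest (fun x hx => by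
              simp at hx; omega)
            rw [show cs.length - (k + 1) = cs.length - 1 - k by omega] at this
            rw [this]
            simp
          · have hnp : '(' ∉ (cs.take (cs.length - 1 - k)).drop (p + 1) := by
              rw [paren_mem_iff, hPin]
              have : (p' :: rest').filter (fun q => q < cs.length - 1 - k) = [] := by
                refine List.filter_eq_nil_iff.mpr (fun x hx => ?_)
                have hpw' : ∀ y ∈ rest', p' < y :=
                  (List.pairwise_cons.mp (List.pairwise_cons.mp hfilpw).2).1
                rcases List.mem_cons.mp hx with rfl | hmem'
                · simp; omega
                · have := hpw' x hmem'; simp; omega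
              rw [this]
              simp
            rw [if_neg hnp, if_neg hcond]
            simp

-- ===== VERDICT (by name: the statement is the Claim_ definition above) =====
theorem chain_rule_spec : Claim_equal_chain_rule := by
  intro term _ hpre
  obtain ⟨h1, h2⟩ := hpre
  have hp : preChain term.toList = true :=
    pre_sound term.toList.length term.toList (le_refl _) h1 h2
  unfold Spec_chain_rule chain_rule chain_rule_alt
  have hbp : loopB term.toList [] =
      peelB term.toList term.toList.length 0 0 (parenIdxs term.toList) := by
    have := loopB_eq_peelB term.toList (parenIdxs term.toList) 0 0
      (by rw [List.filter_eq_self.mpr]; intro x _; simp)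
      (by intro p hp'; have := findIdxs_lt (fun c => c = '(') term.toList p
            (List.mem_of_mem_head? hp'); omega)
    rw [Nat.sub_zero, List.take_length, List.drop_zero] at this
    exact this
  rw [main_eq term.toList.length term.toList (le_refl _) hp, hbp]
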